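-- pv_equiv track=rewrite | github.com/scullionw/project-euler | python/problem038.py | conpro
-- ===== SOURCE A (Python) =====
-- def conpro(integer, size=9):
-- 	through = 2
-- 	concatenated_product = []
-- 	while len(concatenated_product) < size:
-- 		concatenated_product = ''.join([str(integer * n) for n in range(1, through + 1)])
-- 		through += 1
-- 	if len(concatenated_product) == size:
-- 		return concatenated_product
-- 	else:
-- 		return None
-- ===== SOURCE B (Python) =====
-- def conpro(integer, size=9):
--     if size <= 0:
--         return None
--     s = str(integer) + str(integer * 2)
--     n = 3
--     while len(s) < size:
--         s += str(integer * n)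
--         n += 1
--     return s if len(s) == size else None
-- ===== Notes on version B (the rewrite author's own statement) =====
-- stated objective: faster
-- what changed: A rebuilds the whole concatenated string from scratch (join over str(integer*n) for n=1..through) on every loop iteration; B guards size<=0 up front, starts from str(integer)+str(integer*2) and appends exactly one new term str(integer*n) per iteration, turning the quadratic rebuild into a single accumulation pass.
-- outside the precondition, e.g. on conpro(192, 0): A returns [], B returns None
import Mathlib
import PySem

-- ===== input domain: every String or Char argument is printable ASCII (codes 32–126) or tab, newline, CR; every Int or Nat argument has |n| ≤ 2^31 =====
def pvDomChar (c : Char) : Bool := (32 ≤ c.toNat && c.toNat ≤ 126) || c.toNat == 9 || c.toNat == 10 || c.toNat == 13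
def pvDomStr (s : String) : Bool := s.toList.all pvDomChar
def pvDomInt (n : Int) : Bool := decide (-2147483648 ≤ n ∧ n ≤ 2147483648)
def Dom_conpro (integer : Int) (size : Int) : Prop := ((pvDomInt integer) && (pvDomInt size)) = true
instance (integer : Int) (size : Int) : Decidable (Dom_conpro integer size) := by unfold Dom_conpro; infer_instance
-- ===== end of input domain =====

-- B replaces A's quadratic rebuild-the-whole-string-each-iteration loop by a single
-- incremental accumulation pass appending one term per iteration (objective: faster).


-- ===== PORT A =====
-- str(integer) has at least one character (needed only for the loops' termination)
theorem conpro_tdcLen (b : Nat) : ∀ (f n : Nat) (l : List Char), l.length ≤ (Nat.toDigitsCore b f n l).length := by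
  intro f
  induction f with
  | zero => intro n l; simp [Nat.toDigitsCore]
  | succ f ih =>
    intro n l
    simp only [Nat.toDigitsCore]
    split
    · simp
    · exact le_trans (by simp) (ih _ _)

theorem conpro_toCharsLen (n : Int) : 1 ≤ (PySem.Int.toChars n).length := by
  unfold PySem.Int.toChars
  split
  · simp
  · unfold Nat.toDigits
    simp only [Nat.toDigitsCore]
    split
    · simp
    · exact le_trans (by simp) (conpro_tdcLen 10 _ _ _)

-- ''.join([str(integer * n) for n in range(1, through + 1)])  (as a list of code points)
def conproBuild (integer : Int) (through : Int) : List Char :=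
  PySem.Chars.join [] ((PySem.List.pyRange 1 (through + 1) 1).map (fun n => PySem.Int.toChars (integer * n)))

-- (conproBuild i t).length ≥ t : each of the t joined terms is nonempty (termination only)
theorem conpro_joinNil (l : List (List Char)) : PySem.Chars.join [] l = l.flatten := by
  match l with
  | [] => simp [PySem.Chars.join_nil]
  | [p] => simp [PySem.Chars.join_singleton]
  | p :: q :: rest =>
      rw [PySem.Chars.join_cons_cons]
      simp [conpro_joinNil (q :: rest)]

theorem conproBuild_succ (integer t : Int) (ht : 0 ≤ t) :
    conproBuild integer (t + 1) = conproBuild integer t ++ PySem.Int.toChars (integer * (t + 1)) := by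
  unfold conproBuild
  rw [PySem.List.pyRange_one_succ_right (show (1:Int) ≤ t + 1 by omega)]
  simp [conpro_joinNil]

theorem conproBuild_len (integer : Int) : ∀ (t : Int), 0 ≤ t → t ≤ ((conproBuild integer t).length : Int) := by
  intro t ht
  induction t, ht using Int.le_induction with
  | base =>
      unfold conproBuild
      rw [PySem.List.pyRange_one_eq_nil (by omega)]
      simp [PySem.Chars.join_nil]
  | succ t ht' ih =>
      rw [conproBuild_succ integer t (by omega)]
      have := conpro_toCharsLen (integer * (t + 1))
      simp only [List.length_append]
      omega

-- the while-loop of A: cur is rebuilt from scratch each iteration; the proof argument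
-- (an invariant A's loop maintains) only justifies termination
def conproLoopA (integer size : Int) (through : Int) (cur : List Char)
    (h : 2 ≤ through ∧ through ≤ (cur.length : Int) + 2) : List Char :=
  if hc : (cur.length : Int) < size then
    conproLoopA integer size (through + 1) (conproBuild integer through)
      ⟨by omega, by have := conproBuild_len integer through (by omega); omega⟩
  else cur
termination_by (size + 2 - through).toNat
decreasing_by omega

def conpro (integer : Int) (size : Int) : Option String :=
  let r := conproLoopA integer size 2 [] (by norm_num)
  if (r.length : Int) = size then some (String.ofList r) else none

-- ===== PORT B =====
-- the while-loop of B: appends one term str(integer * n) per iteration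
def conproLoopB (integer size : Int) (n : Int) (s : List Char) : List Char :=
  if (s.length : Int) < size then
    conproLoopB integer size (n + 1) (s ++ PySem.Int.toChars (integer * n))
  else s
termination_by (size - s.length).toNat
decreasing_by have := conpro_toCharsLen (integer * n); simp only [List.length_append]; omega

def conpro_alt (integer : Int) (size : Int) : Option String :=
  if size ≤ 0 then none
  else
    let s := conproLoopB integer size 3 (PySem.Int.toChars integer ++ PySem.Int.toChars (integer * 2))
    if (s.length : Int) = size then some (String.ofList s) else none

-- ===== PRECONDITION & SPEC =====
-- Pre_ excludes size = 0 only: there A returns the initial empty LIST [] (not a str,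
-- so not a value of the declared Option String type); B returns None there.
def Pre_conpro (integer : Int) (size : Int) : Prop := size ≠ 0
instance (integer : Int) (size : Int) : Decidable (Pre_conpro integer size) := by unfold Pre_conpro; infer_instance
def pvWitness_conpro : Int × Int := (192, 9)

def Spec_conpro (integer : Int) (size : Int) (out : Option String) : Prop := out = conpro_alt integer size
instance (integer : Int) (size : Int) (out : Option String) : Decidable (Spec_conpro integer size out) := by unfold Spec_conpro; infer_instance

-- ===== CLAIM (what is proved, stated in full; the proofs are below) =====
def Claim_equal_conpro : Prop := ∀ (integer : Int) (size : Int), Dom_conpro integer size → Pre_conpro integer size → Spec_conpro integer size (conpro integer size)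

-- ===== LEMMAS AND PROOFS =====
-- str(i) ++ str(2*i) is exactly A's first rebuilt string (through = 2)
theorem conproBuild_two (integer : Int) :
    conproBuild integer 2 = PySem.Int.toChars integer ++ PySem.Int.toChars (integer * 2) := by
  have h1 : conproBuild integer 1 = PySem.Int.toChars integer := by
    unfold conproBuild
    rw [PySem.List.pyRange_one_singleton]
    simp [PySem.Chars.join_singleton]
  rw [show (2 : Int) = 1 + 1 from rfl, conproBuild_succ integer 1 (by norm_num), h1]

-- from the state (through = t+1, cur = conproBuild i t) the two loops compute the same string
theorem conproLoop_eq (integer size : Int) : ∀ (k : Nat) (t : Int), 2 ≤ t → (size - t).toNat ≤ k →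
    ∀ h, conproLoopA integer size (t + 1) (conproBuild integer t) h =
         conproLoopB integer size (t + 1) (conproBuild integer t) := by
  intro k
  induction k with
  | zero =>
      intro t ht hk h
      have hlen := conproBuild_len integer t (by omega)
      have hc : ¬ ((conproBuild integer t).length : Int) < size := by omega
      rw [conproLoopA, conproLoopB, dif_neg hc, if_neg hc]
  | succ k ih =>
      intro t ht hk h
      rw [conproLoopA, conproLoopB]
      by_cases hc : ((conproBuild integer t).length : Int) < size
      · rw [dif_pos hc, if_pos hc]
        have hlen := conproBuild_len integer t (by omega)
        have harg : conproBuild integer t ++ PySem.Int.toChars (integer * (t + 1))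
            = conproBuild integer (t + 1) := (conproBuild_succ integer t (by omega)).symm
        rw [harg]
        exact ih (t + 1) (by omega) (by omega)
          ⟨by omega, by have := conproBuild_len integer (t + 1) (by omega); omega⟩
      · rw [dif_neg hc, if_neg hc]

-- ===== VERDICT (by name: the statement is the Claim_ definition above) =====
theorem conpro_spec : Claim_equal_conpro := by
  intro integer size _ hpre
  unfold Spec_conpro conpro conpro_alt
  by_cases hs : size ≤ 0
  · have hne : size ≠ 0 := hpre
    have hc : ¬ (((([] : List Char)).length : Int) < size) := by simp; omega
    rw [conproLoopA, dif_neg hc, if_pos hs,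
      if_neg (show ¬ ((([] : List Char)).length : Int) = size by simp; omega)]
  · rw [if_neg hs]
    rw [conproLoopA]
    have hc : ((([] : List Char)).length : Int) < size := by simp; omega
    rw [dif_pos hc]
    have key := conproLoop_eq integer size (size - 2).toNat 2 le_rfl le_rfl
      ⟨by omega, by have := conproBuild_len integer 2 (by omega); omega⟩
    rw [key, conproBuild_two]
    norm_num
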